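-- pv_equiv track=rewrite | github.com/kevinliao2003/CodePath-TIP102-Spr2025 | Unit7Session2.py | find_affordable_ticket
-- ===== SOURCE A (Python) =====
-- def find_affordable_ticket(prices, budget):
--     """
--     U - Understand
--     - find a concert ticket closed to the target
--     - prices is sorted in increasing order
--     - algo must run in O(logn) time
--     - price must not be greater than the budget
--     - return -1 if no ticket is found
--
--     M - Match
--     - binary search
--
--     P - Plan
--     variables:
--     - l (left pointer) to 0
--     - r (right pointer) to last index
--     - res_idx, res_num
--
--     while l < r
--         get middle index (m)
--         if m is less than target and the diff is less or equal to than the diff between res_num and target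
--             update res_num
--             update res_idx
--             set r to m
--         else
--             set l to m + 1
--
--     return res_idx
--
--     I - Implement
--     - see code below
--
--     R - Review
--     - see test cases below
--
--     E - Evaluate
--     """
--
--     l, r = 0, len(prices) - 1
--     res_idx = -1 # if no ticket is found, return -1
--
--     while l < r:
--         m = (l + r) // 2
--         if prices[m] == budget:
--             return m
--         elif prices[m] < budget:
--             res_idx = m
--             l = m + 1
--         else:
--             r = m
--
--     return res_idx
-- ===== SOURCE B (Python) =====
-- def find_affordable_ticket(prices, budget):
--     # Divide-and-conquer on list slices: recurse on the active segment itself,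
--     # carrying the offset of the segment and the best index found so far.
--     def go(seg, off, res):
--         if len(seg) < 2:
--             return res
--         k = (len(seg) - 1) // 2
--         v = seg[k]
--         if v == budget:
--             return off + k
--         if v < budget:
--             return go(seg[k + 1:], off + k + 1, off + k)
--         return go(seg[:k + 1], off, res)
--     return go(prices, 0, -1)
-- ===== Notes on version B (the rewrite author's own statement) =====
-- stated objective: alternative
-- what changed: Replaces A's imperative two-pointer while loop over indices (l, r, res_idx) with a divide-and-conquer recursion that slices the list itself, carrying the slice's offset and the best index found so far as accumulators.
import Mathlib
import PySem

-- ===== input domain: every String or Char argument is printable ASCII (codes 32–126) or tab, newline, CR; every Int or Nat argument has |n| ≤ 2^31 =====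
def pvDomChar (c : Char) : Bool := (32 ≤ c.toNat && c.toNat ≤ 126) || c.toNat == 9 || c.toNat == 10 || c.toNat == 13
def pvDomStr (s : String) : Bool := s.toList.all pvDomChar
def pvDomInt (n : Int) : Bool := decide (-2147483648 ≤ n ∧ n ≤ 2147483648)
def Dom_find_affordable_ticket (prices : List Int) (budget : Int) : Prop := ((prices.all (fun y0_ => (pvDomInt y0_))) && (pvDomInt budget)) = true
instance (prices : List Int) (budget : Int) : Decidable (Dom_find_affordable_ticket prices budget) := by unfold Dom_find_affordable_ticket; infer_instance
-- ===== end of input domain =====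

-- B replaces A's two-pointer while loop by a divide-and-conquer recursion on list
-- slices (segment + offset accumulator); objective: alternative structure, no speed claim.

-- ===== PORT A =====
-- A's while loop, state (l, r, res_idx); m = (l+r)//2 is written inline.  Whenever the
-- loop dereferences prices[m] the index is in range, so pyGetD's default is never used.
def pvLoopA (prices : List Int) (budget : Int) (l r res : Int) : Int :=
  if _h : l < r then
    if PySem.List.pyGetD prices (PySem.Int.floordiv (l + r) 2) 0 = budget then
      PySem.Int.floordiv (l + r) 2
    else if PySem.List.pyGetD prices (PySem.Int.floordiv (l + r) 2) 0 < budget then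
      pvLoopA prices budget (PySem.Int.floordiv (l + r) 2 + 1) r (PySem.Int.floordiv (l + r) 2)
    else
      pvLoopA prices budget l (PySem.Int.floordiv (l + r) 2) res
  else res
termination_by (r - l).toNat
decreasing_by
  · have h2 := PySem.Int.floordiv_two_mid_bounds (le_of_lt _h)
    omega
  · have h2 := PySem.Int.floordiv_two_mid_bounds (le_of_lt _h)
    have h3 : PySem.Int.floordiv (l + r) 2 < r := by
      rw [PySem.Int.floordiv_eq_ediv_of_pos (by omega : (0:Int) < 2)]
      omega
    omega

def find_affordable_ticket (prices : List Int) (budget : Int) : Int :=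
  pvLoopA prices budget 0 ((prices.length : Int) - 1) (-1)

-- ===== PORT B =====
-- B's recursion on the active slice, carrying the slice's offset and the best index so
-- far; k = (len(seg)-1)//2 and seg[k] are written inline (k is a Nat index into seg).
def pvGoB (budget : Int) (seg : List Int) (off res : Int) : Int :=
  if h : seg.length < 2 then res
  else
    if seg.getD ((seg.length - 1) / 2) 0 = budget then
      off + (((seg.length - 1) / 2 : ℕ) : Int)
    else if seg.getD ((seg.length - 1) / 2) 0 < budget then
      pvGoB budget (seg.drop ((seg.length - 1) / 2 + 1))
        (off + ((((seg.length - 1) / 2 : ℕ) : Int) + 1))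
        (off + (((seg.length - 1) / 2 : ℕ) : Int))
    else
      pvGoB budget (seg.take ((seg.length - 1) / 2 + 1)) off res
termination_by seg.length
decreasing_by
  · simp only [List.length_drop]; omega
  · simp only [List.length_take]; omega

def find_affordable_ticket_alt (prices : List Int) (budget : Int) : Int :=
  pvGoB budget prices 0 (-1)

-- ===== PRECONDITION & SPEC =====
def Spec_find_affordable_ticket (prices : List Int) (budget : Int) (out : Int) : Prop := out = find_affordable_ticket_alt prices budget
instance (prices : List Int) (budget : Int) (out : Int) : Decidable (Spec_find_affordable_ticket prices budget out) := by unfold Spec_find_affordable_ticket; infer_instance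

-- ===== CLAIM (what is proved, stated in full; the proofs are below) =====
def Claim_equal_find_affordable_ticket : Prop := ∀ (prices : List Int) (budget : Int), Dom_find_affordable_ticket prices budget → Spec_find_affordable_ticket prices budget (find_affordable_ticket prices budget)

-- ===== LEMMAS AND PROOFS =====

-- A's loop state (l, r, res) corresponds to B's recursion on the slice prices[l : r+1].
theorem pvLoop_eq_go (prices : List Int) (budget : Int) :
    ∀ (n : ℕ) (l r res : Int), (r - l).toNat ≤ n → 0 ≤ l → r < (prices.length : Int) →
      pvLoopA prices budget l r res =
        pvGoB budget ((prices.drop l.toNat).take (r + 1 - l).toNat) l res := by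
  intro n
  induction n with
  | zero =>
    intro l r res hn hl hr
    have hlr : ¬ l < r := by omega
    have hlen : ((prices.drop l.toNat).take (r + 1 - l).toNat).length < 2 := by
      simp only [List.length_take, List.length_drop]; omega
    rw [pvLoopA, pvGoB, dif_neg hlr, dif_pos hlen]
  | succ n ih =>
    intro l r res hn hl hr
    by_cases hlr : l < r
    · rw [pvLoopA, pvGoB]
      set seg := (prices.drop l.toNat).take (r + 1 - l).toNat with hseg
      have hlen : seg.length = (r + 1 - l).toNat := by
        simp only [hseg, List.length_take, List.length_drop]; omega
      have hlen2 : ¬ seg.length < 2 := by omega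
      rw [dif_pos hlr, dif_neg hlen2]
      have hm : PySem.Int.floordiv (l + r) 2 = (l + r) / 2 :=
        PySem.Int.floordiv_eq_ediv_of_pos (by omega)
      set m := PySem.Int.floordiv (l + r) 2 with hmdef
      have hml : l ≤ m := (PySem.Int.floordiv_two_mid_bounds (le_of_lt hlr)).1
      have hmr : m < r := by rw [hm]; omega
      have hk : ((seg.length - 1) / 2 : ℕ) = (m - l).toNat := by
        rw [hlen, hm]; omega
      have hkk : (((seg.length - 1) / 2 : ℕ) : Int) = m - l := by rw [hk]; omega
      have hklt : ((seg.length - 1) / 2 : ℕ) < seg.length := by omega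
      -- the element B examines is the element A examines
      have hv : seg.getD ((seg.length - 1) / 2) 0 = PySem.List.pyGetD prices m 0 := by
        rw [PySem.List.pyGetD_eq_getElem prices 0 (by omega) (by omega)]
        rw [List.getD_eq_getElem seg 0 hklt]
        have h1 : seg[(seg.length - 1) / 2]'hklt =
            (prices.drop l.toNat)[(seg.length - 1) / 2]'(by
              simp only [List.length_drop]; omega) := by
          simp only [hseg]; exact List.getElem_take
        rw [h1, List.getElem_drop]
        congr 1
        omega
      rw [hv]
      by_cases hveq : PySem.List.pyGetD prices m 0 = budget
      · rw [if_pos hveq, if_pos hveq]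
        omega
      · rw [if_neg hveq, if_neg hveq]
        by_cases hvlt : PySem.List.pyGetD prices m 0 < budget
        · rw [if_pos hvlt, if_pos hvlt]
          rw [ih (m + 1) r m (by omega) (by omega) hr]
          have hsegdrop : seg.drop ((seg.length - 1) / 2 + 1) =
              (prices.drop (m + 1).toNat).take (r + 1 - (m + 1)).toNat := by
            rw [hk]
            simp only [hseg, List.drop_take, List.drop_drop]
            congr 2 <;> omega
          rw [hsegdrop]
          congr 1 <;> omega
        · rw [if_neg hvlt, if_neg hvlt]
          rw [ih l m res (by omega) hl (by omega)]
          have hsegtake : seg.take ((seg.length - 1) / 2 + 1) =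
              (prices.drop l.toNat).take (m + 1 - l).toNat := by
            rw [hk]
            simp only [hseg, List.take_take]
            congr 1
            omega
          rw [hsegtake]
    · have hlen : ((prices.drop l.toNat).take (r + 1 - l).toNat).length < 2 := by
        simp only [List.length_take, List.length_drop]; omega
      rw [pvLoopA, pvGoB, dif_neg hlr, dif_pos hlen]

-- ===== VERDICT (by name: the statement is the Claim_ definition above) =====
theorem find_affordable_ticket_spec : Claim_equal_find_affordable_ticket := by
  intro prices budget _
  unfold Spec_find_affordable_ticket find_affordable_ticket find_affordable_ticket_alt
  rw [pvLoop_eq_go prices budget ((prices.length : Int) - 1 - 0).toNat 0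
      ((prices.length : Int) - 1) (-1) (le_refl _) (le_refl 0) (by omega)]
  congr 1
  simp
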